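-- pv_equiv track=rewrite | github.com/MTDoven/Generative-Super-Resolution | src/models/autoencoder.py | _tile_starts
-- ===== SOURCE A (Python) =====
-- def _tile_starts(length: int, tile_size: int, overlap: int) -> list[int]:
--     if tile_size >= length:
--         return [0]
--
--     stride = max(tile_size - overlap, 1)
--     starts = [0]
--     while starts[-1] + tile_size < length:
--         next_start = starts[-1] + stride
--         if next_start + tile_size >= length:
--             next_start = length - tile_size
--         if next_start == starts[-1]:
--             break
--         starts.append(next_start)
--     return starts
-- ===== SOURCE B (Python) =====
-- def _tile_starts(length: int, tile_size: int, overlap: int) -> list[int]: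
--     if tile_size >= length:
--         return [0]
--     stride = max(tile_size - overlap, 1)
--     starts = list(range(0, length - tile_size, stride))
--     starts.append(length - tile_size)
--     return starts
-- ===== Notes on version B (the rewrite author's own statement) =====
-- stated objective: simpler
-- what changed: Replaces the accumulating while-loop with its per-step clamp and dead break by a one-shot range(0, length - tile_size, stride) plus a single append of the clamped final start.
import Mathlib
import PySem

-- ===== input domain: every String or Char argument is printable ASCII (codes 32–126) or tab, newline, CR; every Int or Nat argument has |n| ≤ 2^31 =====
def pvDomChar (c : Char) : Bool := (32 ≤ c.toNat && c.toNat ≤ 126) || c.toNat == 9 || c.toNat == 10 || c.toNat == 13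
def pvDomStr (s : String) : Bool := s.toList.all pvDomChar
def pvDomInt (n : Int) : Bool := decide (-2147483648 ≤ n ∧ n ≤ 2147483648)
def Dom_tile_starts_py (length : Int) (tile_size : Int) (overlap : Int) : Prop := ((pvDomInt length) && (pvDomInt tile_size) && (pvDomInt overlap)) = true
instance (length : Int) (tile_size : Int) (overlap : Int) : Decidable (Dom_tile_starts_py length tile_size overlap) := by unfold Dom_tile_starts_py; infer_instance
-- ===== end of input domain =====

-- B replaces A's accumulating while-loop (per-step clamp, dead break) by a direct
-- range(0, length - tile_size, stride) plus one append of the clamped final start; objective: simpler.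

-- ===== PORT A =====
-- the while-loop of A, with fuel merely making the same computation total
def tileLoopA (length : Int) (tile_size : Int) (stride : Int) : Nat → List Int → Int → List Int
  | 0, acc, _ => acc
  | fuel+1, acc, last =>
    if last + tile_size < length then
      let next0 := last + stride
      let next := if length ≤ next0 + tile_size then length - tile_size else next0
      if next = last then acc
      else tileLoopA length tile_size stride fuel (acc ++ [next]) next
    else acc

def tile_starts_py (length : Int) (tile_size : Int) (overlap : Int) : List Int :=
  if length ≤ tile_size then [0]
  else
    let stride := max (tile_size - overlap) 1
    tileLoopA length tile_size stride (length - tile_size).toNat [0] 0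

-- ===== PORT B =====
def tile_starts_py_alt (length : Int) (tile_size : Int) (overlap : Int) : List Int :=
  if length ≤ tile_size then [0]
  else
    let stride := max (tile_size - overlap) 1
    PySem.List.pyRange 0 (length - tile_size) stride ++ [length - tile_size]

-- ===== PRECONDITION & SPEC =====
def Spec_tile_starts_py (length : Int) (tile_size : Int) (overlap : Int) (out : List Int) : Prop := out = tile_starts_py_alt length tile_size overlap
instance (length : Int) (tile_size : Int) (overlap : Int) (out : List Int) : Decidable (Spec_tile_starts_py length tile_size overlap out) := by unfold Spec_tile_starts_py; infer_instance

-- ===== CLAIM (what is proved, stated in full; the proofs are below) =====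
def Claim_equal_tile_starts_py : Prop := ∀ (length : Int) (tile_size : Int) (overlap : Int), Dom_tile_starts_py length tile_size overlap → Spec_tile_starts_py length tile_size overlap (tile_starts_py length tile_size overlap)

-- ===== LEMMAS AND PROOFS =====

-- cons form of pyRange for an arbitrary positive step
lemma pyRange_pos_cons (a b : Int) {s : Int} (hs : 0 < s) (hab : a < b) :
    PySem.List.pyRange a b s = a :: PySem.List.pyRange (a + s) b s := by
  rw [PySem.List.pyRange_of_pos _ _ hs, PySem.List.pyRange_of_pos _ _ hs]
  have hx : (0 : Int) ≤ b - a - 1 := by omega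
  have hdiv : (b - a + s - 1) / s = (b - a - 1) / s + 1 := by
    have := Int.add_mul_ediv_right (b - a - 1) 1 (by omega : s ≠ 0)
    calc (b - a + s - 1) / s = (b - a - 1 + 1 * s) / s := by ring_nf
    _ = (b - a - 1) / s + 1 := by rw [this]
  have hq : (0 : Int) ≤ (b - a - 1) / s := Int.ediv_nonneg hx (le_of_lt hs)
  have hn : ((b - a + s - 1) / s).toNat = ((b - a - 1) / s).toNat + 1 := by omega
  rw [if_pos hab, hdiv]
  have hcount : (if a + s < b then ((b - (a + s) + s - 1) / s).toNat else 0)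
      = ((b - a - 1) / s).toNat := by
    by_cases h : a + s < b
    · rw [if_pos h]; congr 1; ring_nf
    · rw [if_neg h]
      have : (b - a - 1) / s = 0 := Int.ediv_eq_zero_of_lt hx (by omega)
      omega
  have hn' : ((b - a - 1) / s + 1).toNat = ((b - a - 1) / s).toNat + 1 := by omega
  rw [hcount, hn', List.range_succ_eq_map, List.map_cons, List.map_map]
  congr 1
  · simp
  · apply List.map_congr_left
    intro k _
    simp [Function.comp]
    ring

lemma tileLoopA_done (length tile_size stride : Int) (fuel : Nat) (acc : List Int) (last : Int)
    (h : ¬ last + tile_size < length) : tileLoopA length tile_size stride fuel acc last = acc := by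
  cases fuel with
  | zero => rfl
  | succ n => simp [tileLoopA, h]

lemma tileLoopA_eq (length tile_size stride : Int) (hs : 0 < stride) :
    ∀ (fuel : Nat) (last : Int) (acc : List Int),
      last < length - tile_size → length - tile_size - last ≤ (fuel : Int) →
      tileLoopA length tile_size stride fuel acc last
        = acc ++ PySem.List.pyRange (last + stride) (length - tile_size) stride ++ [length - tile_size] := by
  intro fuel
  induction fuel with
  | zero => intro last acc hlt hf; exfalso; simp at hf; omega
  | succ n ih =>
    intro last acc hlt hf
    have hcond : last + tile_size < length := by omega
    by_cases hclamp : length ≤ last + stride + tile_size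
    · -- final step: clamp to length - tile_size, then the loop exits
      have hne : length - tile_size ≠ last := by omega
      simp only [tileLoopA, if_pos hcond, if_pos hclamp, if_neg hne]
      rw [tileLoopA_done _ _ _ _ _ _ (by omega)]
      have hnil : PySem.List.pyRange (last + stride) (length - tile_size) stride = [] := by
        rw [PySem.List.pyRange_of_pos _ _ hs, if_neg (by omega)]
        simp
      rw [hnil]; simp
    · -- regular step
      have hne : last + stride ≠ last := by omega
      simp only [tileLoopA, if_pos hcond, if_neg hclamp, if_neg hne]
      rw [ih (last + stride) (acc ++ [last + stride]) (by omega) (by push_cast at hf ⊢; omega)]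
      rw [pyRange_pos_cons (last + stride) (length - tile_size) hs (by omega)]
      simp

-- ===== VERDICT (by name: the statement is the Claim_ definition above) =====
theorem tile_starts_py_spec : Claim_equal_tile_starts_py := by
  intro length tile_size overlap _
  unfold Spec_tile_starts_py tile_starts_py tile_starts_py_alt
  by_cases h : length ≤ tile_size
  · simp [h]
  · simp only [if_neg h]
    have hL : 0 < length - tile_size := by omega
    have hs : 0 < max (tile_size - overlap) 1 := by omega
    rw [tileLoopA_eq length tile_size _ hs _ 0 [0] (by omega) (by omega)]
    rw [pyRange_pos_cons 0 (length - tile_size) hs (by omega)]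
    simp
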